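-- pv_equiv track=rewrite | github.com/hanbikan/algorithm-problem | Python/초콜릿 식사.py | getSliceCount
-- ===== SOURCE A (Python) =====
-- def getSliceCount(area, index):
--     offset = area//8
--     sliceCount = 2
--     todo = [area//4]
--
--     while True:
--         nextTodo = []
--
--         for idx in todo:
--             if idx == index:
--                 return sliceCount
--             nextTodo += [idx+offset, idx-offset]
--
--         offset //= 2
--         sliceCount += 1
--         todo = nextTodo
-- ===== SOURCE B (Python) =====
-- def getSliceCount(area, index):
--     # Iterative-deepening depth-first search: instead of materialising each whole
--     # breadth-first level, test depth by depth whether index is a depth-level node,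
--     # recursing over the two sign choices and pruning provably unreachable subtrees.
--     def reaches(cur, offset, depth):
--         if depth == 0:
--             return cur == index
--         if offset == 0:
--             return cur == index
--         if offset > 0 and abs(index - cur) >= 2 * offset:
--             return False
--         half = offset // 2
--         return reaches(cur + offset, half, depth - 1) or reaches(cur - offset, half, depth - 1)
--
--     depth = 0
--     sliceCount = 2
--     while not reaches(area // 4, area // 8, depth):
--         depth += 1
--         sliceCount += 1
--     return sliceCount
-- ===== Notes on version B (the rewrite author's own statement) =====
-- stated objective: alternative
-- what changed: A materialises every breadth-first level of the halving tree as a todo list that doubles each level; B instead runs an iterative-deepening depth-first search over the two sign choices, keeping no frontier list and pruning subtrees whose positive offset provably cannot reach index.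
import Mathlib
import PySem

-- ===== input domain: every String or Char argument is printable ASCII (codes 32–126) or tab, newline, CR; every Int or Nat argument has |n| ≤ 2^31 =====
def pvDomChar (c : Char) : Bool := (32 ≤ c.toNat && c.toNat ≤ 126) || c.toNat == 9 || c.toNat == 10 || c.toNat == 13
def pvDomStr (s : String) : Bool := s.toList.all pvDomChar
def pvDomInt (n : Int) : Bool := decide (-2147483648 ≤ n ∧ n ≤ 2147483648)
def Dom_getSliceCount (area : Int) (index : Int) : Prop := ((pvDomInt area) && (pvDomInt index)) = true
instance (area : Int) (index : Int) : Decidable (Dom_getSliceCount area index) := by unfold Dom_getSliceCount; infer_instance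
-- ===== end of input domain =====

-- B replaces A's breadth-first frontier list by an iterative-deepening depth-first search with
-- arithmetic pruning; same return value on every input (both loops are unbounded in Python, so both
-- ports carry the same fuel and agree level by level, fuel exhaustion included).

-- ===== PORT A =====
-- the inner 'for idx in todo' loop: 'none' = the early 'return sliceCount' fired,
-- 'some nt' = the loop finished with nextTodo = nt (accumulator built in Python's append order)
def innerA (index offset : Int) : List Int → List Int → Option (List Int)
  | acc, [] => some acc.reverse
  | acc, idx :: rest =>
      if idx = index then none
      else innerA index offset ((idx - offset) :: (idx + offset) :: acc) rest

-- the 'while True' loop; Python's loop is unbounded, so the port carries fuel (both ports use 64)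
def aLoop (index : Int) : Nat → List Int → Int → Int → Int
  | 0, _, _, _ => 0
  | fuel+1, todo, offset, sliceCount =>
      match innerA index offset [] todo with
      | none => sliceCount
      | some nextTodo => aLoop index fuel nextTodo (PySem.Int.floordiv offset 2) (sliceCount + 1)

def getSliceCount (area : Int) (index : Int) : Int :=
  aLoop index 64 [PySem.Int.floordiv area 4] (PySem.Int.floordiv area 8) 2

-- ===== PORT B =====
-- Source B's recursive 'reaches(cur, offset, depth)', branch for branch
def reaches (index : Int) : Int → Int → Nat → Bool
  | cur, _, 0 => cur == index
  | cur, offset, depth+1 =>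
      if offset = 0 then cur == index
      else if 0 < offset ∧ 2 * offset ≤ |index - cur| then false
      else
        reaches index (cur + offset) (PySem.Int.floordiv offset 2) depth
          || reaches index (cur - offset) (PySem.Int.floordiv offset 2) depth

-- Source B's 'while not reaches(...)' loop, same fuel convention as aLoop
def bLoop (area index : Int) : Nat → Nat → Int → Int
  | 0, _, _ => 0
  | fuel+1, depth, sliceCount =>
      if reaches index (PySem.Int.floordiv area 4) (PySem.Int.floordiv area 8) depth
      then sliceCount
      else bLoop area index fuel (depth + 1) (sliceCount + 1)

def getSliceCount_alt (area : Int) (index : Int) : Int :=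
  bLoop area index 64 0 2

-- ===== PRECONDITION & SPEC =====
def Spec_getSliceCount (area : Int) (index : Int) (out : Int) : Prop := out = getSliceCount_alt area index
instance (area : Int) (index : Int) (out : Int) : Decidable (Spec_getSliceCount area index out) := by
  unfold Spec_getSliceCount; infer_instance

-- ===== CLAIM (what is proved, stated in full; the proofs are below) =====
def Claim_equal_getSliceCount : Prop := ∀ (area : Int) (index : Int), Dom_getSliceCount area index → Spec_getSliceCount area index (getSliceCount area index)

-- ===== LEMMAS AND PROOFS =====

-- unpruned membership: x is a depth-level descendant of cur under the halving offset chain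
def nodeMem (x : Int) : Int → Int → Nat → Bool
  | cur, _, 0 => x == cur
  | cur, o, d+1 =>
      nodeMem x (cur + o) (PySem.Int.floordiv o 2) d || nodeMem x (cur - o) (PySem.Int.floordiv o 2) d

-- the offset after j halvings
def offIter (o : Int) : Nat → Int
  | 0 => o
  | j+1 => offIter (PySem.Int.floordiv o 2) j

lemma offIter_succ (o : Int) (j : Nat) :
    offIter o (j + 1) = PySem.Int.floordiv (offIter o j) 2 := by
  induction j generalizing o with
  | zero => rfl
  | succ j ih => exact ih (PySem.Int.floordiv o 2)

lemma innerA_none_iff (index offset : Int) (todo acc : List Int) :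
    innerA index offset acc todo = none ↔ index ∈ todo := by
  induction todo generalizing acc with
  | nil => simp [innerA]
  | cons idx rest ih =>
    simp only [innerA, List.mem_cons]
    by_cases h : idx = index
    · simp [h]
    · rw [if_neg h, ih]
      constructor
      · exact Or.inr
      · rintro (hc | hc)
        · exact absurd hc.symm h
        · exact hc

lemma innerA_eq_some (index offset : Int) (todo acc : List Int) (h : index ∉ todo) :
    innerA index offset acc todo
      = some (acc.reverse ++ todo.flatMap fun i => [i + offset, i - offset]) := by
  induction todo generalizing acc with
  | nil => simp [innerA]
  | cons idx rest ih =>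
    simp only [List.mem_cons, not_or] at h
    have h1 : idx ≠ index := fun hh => h.1 hh.symm
    rw [innerA, if_neg h1, ih _ h.2]
    simp

-- with offset 0 every descendant equals cur
lemma nodeMem_zero (x cur : Int) (d : Nat) : nodeMem x cur 0 d = (x == cur) := by
  induction d generalizing cur with
  | zero => rfl
  | succ d ih =>
    have h0 : PySem.Int.floordiv 0 2 = 0 := by decide
    simp only [nodeMem, h0, ih]
    simp

-- a positive offset bounds how far any descendant can be
lemma nodeMem_bound (x : Int) : ∀ (d : Nat) (cur o : Int), 0 < o →
    nodeMem x cur o d = true → |x - cur| ≤ 2 * o - 1 := by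
  intro d
  induction d with
  | zero =>
    intro cur o ho h
    simp only [nodeMem, beq_iff_eq] at h
    subst h; simp; omega
  | succ d ih =>
    intro cur o ho h
    have hfd : PySem.Int.floordiv o 2 = o / 2 := PySem.Int.floordiv_eq_ediv_of_pos (by norm_num)
    simp only [nodeMem, hfd, Bool.or_eq_true] at h
    by_cases hq : o / 2 = 0
    · have h1 : o = 1 := by omega
      subst h1
      rcases h with h | h <;> rw [hq, nodeMem_zero, beq_iff_eq] at h <;> subst h <;> norm_num
    · have hq0 : 0 < o / 2 := by omega
      have h2q : 2 * (o / 2) ≤ o := by omega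
      rcases h with h | h
      · have := ih (cur + o) (o / 2) hq0 h
        rw [abs_le] at this ⊢; omega
      · have := ih (cur - o) (o / 2) hq0 h
        rw [abs_le] at this ⊢; omega

-- pruned search agrees with unpruned membership of index
lemma reaches_eq_nodeMem (index : Int) : ∀ (d : Nat) (cur o : Int),
    reaches index cur o d = nodeMem index cur o d := by
  intro d
  induction d with
  | zero =>
    intro cur o
    simp only [reaches, nodeMem]
    by_cases h : cur = index <;> simp [h, Ne.symm, eq_comm]
  | succ d ih =>
    intro cur o
    by_cases ho0 : o = 0
    · rw [show reaches index cur o (d + 1) =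
          (if o = 0 then (cur == index) else
            if 0 < o ∧ 2 * o ≤ |index - cur| then false else
              reaches index (cur + o) (PySem.Int.floordiv o 2) d
                || reaches index (cur - o) (PySem.Int.floordiv o 2) d) from rfl,
        if_pos ho0, ho0, nodeMem_zero]
      by_cases h : cur = index <;> simp [h, Ne.symm, eq_comm]
    · by_cases hp : 0 < o ∧ 2 * o ≤ |index - cur|
      · rw [show reaches index cur o (d + 1) =
            (if o = 0 then (cur == index) else
              if 0 < o ∧ 2 * o ≤ |index - cur| then false else
                reaches index (cur + o) (PySem.Int.floordiv o 2) d
                  || reaches index (cur - o) (PySem.Int.floordiv o 2) d) from rfl,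
          if_neg ho0, if_pos hp]
        cases hnm : nodeMem index cur o (d + 1) with
        | false => rfl
        | true =>
          have hb := nodeMem_bound index (d + 1) cur o hp.1 hnm
          omega
      · rw [show reaches index cur o (d + 1) =
            (if o = 0 then (cur == index) else
              if 0 < o ∧ 2 * o ≤ |index - cur| then false else
                reaches index (cur + o) (PySem.Int.floordiv o 2) d
                  || reaches index (cur - o) (PySem.Int.floordiv o 2) d) from rfl,
          if_neg ho0, if_neg hp]
        show _ = nodeMem index cur o (d + 1)
        rw [show nodeMem index cur o (d + 1) =
            (nodeMem index (cur + o) (PySem.Int.floordiv o 2) d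
              || nodeMem index (cur - o) (PySem.Int.floordiv o 2) d) from rfl,
          ih, ih]

-- one BFS step: depth-(d+1) descendants are the ± offIter children of depth-d descendants
lemma nodeMem_succ (x : Int) : ∀ (d : Nat) (cur o : Int),
    nodeMem x cur o (d + 1) = true ↔
      ∃ y, nodeMem y cur o d = true ∧ (x = y + offIter o d ∨ x = y - offIter o d) := by
  intro d
  induction d with
  | zero =>
    intro cur o
    show (nodeMem x (cur + o) (PySem.Int.floordiv o 2) 0
        || nodeMem x (cur - o) (PySem.Int.floordiv o 2) 0) = true ↔ _
    simp only [nodeMem, Bool.or_eq_true, beq_iff_eq, offIter]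
    constructor
    · rintro (h | h)
      · exact ⟨cur, rfl, Or.inl h⟩
      · exact ⟨cur, rfl, Or.inr h⟩
    · rintro ⟨y, rfl, h | h⟩
      · exact Or.inl h
      · exact Or.inr h
  | succ d ih =>
    intro cur o
    show (nodeMem x (cur + o) (PySem.Int.floordiv o 2) (d + 1)
        || nodeMem x (cur - o) (PySem.Int.floordiv o 2) (d + 1)) = true ↔ _
    simp only [Bool.or_eq_true, ih]
    constructor
    · rintro (⟨y, hy, hx⟩ | ⟨y, hy, hx⟩)
      · exact ⟨y, by simp only [nodeMem, Bool.or_eq_true]; exact Or.inl hy, hx⟩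
      · exact ⟨y, by simp only [nodeMem, Bool.or_eq_true]; exact Or.inr hy, hx⟩
    · rintro ⟨y, hy, hx⟩
      rw [show nodeMem y cur o (d + 1) = (nodeMem y (cur + o) (PySem.Int.floordiv o 2) d
          || nodeMem y (cur - o) (PySem.Int.floordiv o 2) d) from rfl] at hy
      simp only [Bool.or_eq_true] at hy
      rcases hy with h | h
      · exact Or.inl ⟨y, h, hx⟩
      · exact Or.inr ⟨y, h, hx⟩

-- the two loops agree level by level (same fuel, aligned states)
lemma loops_eq (area index : Int) :
    ∀ (fuel j : Nat) (todo : List Int) (c : Int),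
    (∀ x, x ∈ todo ↔ nodeMem x (PySem.Int.floordiv area 4) (PySem.Int.floordiv area 8) j = true) →
    aLoop index fuel todo (offIter (PySem.Int.floordiv area 8) j) c = bLoop area index fuel j c := by
  intro fuel
  induction fuel with
  | zero => intro j todo c _; rfl
  | succ fuel ih =>
    intro j todo c hyp
    rw [show aLoop index (fuel + 1) todo (offIter (PySem.Int.floordiv area 8) j) c =
        (match innerA index (offIter (PySem.Int.floordiv area 8) j) [] todo with
         | none => c
         | some nextTodo => aLoop index fuel nextTodo
             (PySem.Int.floordiv (offIter (PySem.Int.floordiv area 8) j) 2) (c + 1)) from rfl,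
      show bLoop area index (fuel + 1) j c =
        (if reaches index (PySem.Int.floordiv area 4) (PySem.Int.floordiv area 8) j
         then c else bLoop area index fuel (j + 1) (c + 1)) from rfl]
    by_cases hin : index ∈ todo
    · rw [(innerA_none_iff index _ todo []).mpr hin,
        if_pos (by rw [reaches_eq_nodeMem]; exact (hyp index).mp hin)]
    · have hsome : innerA index (offIter (PySem.Int.floordiv area 8) j) [] todo
          = some (todo.flatMap fun i => [i + offIter (PySem.Int.floordiv area 8) j,
                                         i - offIter (PySem.Int.floordiv area 8) j]) := by
        rw [innerA_eq_some index _ todo [] hin]; simp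
      have hnm : nodeMem index (PySem.Int.floordiv area 4) (PySem.Int.floordiv area 8) j = false := by
        cases hx : nodeMem index (PySem.Int.floordiv area 4) (PySem.Int.floordiv area 8) j with
        | false => rfl
        | true => exact absurd ((hyp index).mpr hx) hin
      rw [hsome, if_neg (by rw [reaches_eq_nodeMem, hnm]; simp)]
      show aLoop index fuel _ (PySem.Int.floordiv (offIter (PySem.Int.floordiv area 8) j) 2) (c + 1)
          = bLoop area index fuel (j + 1) (c + 1)
      rw [← offIter_succ]
      refine ih (j + 1) _ (c + 1) ?_
      intro x
      rw [List.mem_flatMap, nodeMem_succ]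
      constructor
      · rintro ⟨y, hy, hx⟩
        simp only [List.mem_cons, List.not_mem_nil, or_false] at hx
        exact ⟨y, (hyp y).mp hy, hx⟩
      · rintro ⟨y, hy, hx⟩
        exact ⟨y, (hyp y).mpr hy, by simpa using hx⟩

-- ===== VERDICT (by name: the statement is the Claim_ definition above) =====
theorem getSliceCount_spec : Claim_equal_getSliceCount := by
  intro area index _
  unfold Spec_getSliceCount getSliceCount getSliceCount_alt
  refine loops_eq area index 64 0 [PySem.Int.floordiv area 4] 2 ?_
  intro x
  show x ∈ [PySem.Int.floordiv area 4] ↔ (x == PySem.Int.floordiv area 4) = true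
  simp
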